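-- pv_equiv track=rewrite | github.com/mohi-othman/mohi-euler-python | ProjectEuler/ProjectEuler/Euler090.py | fillOutCube
-- ===== SOURCE A (Python) =====
-- def fillOutCube(cube):
--     result = [cube]
--     for index in range(len(cube)+1, 7):
--         newResult = []
--         for c in result:
--             for newNumber in [str(x) for x in range(0,10) if str(x) not in c]:
--                 newCube = list(c)
--                 newCube.append(newNumber)
--                 newResult.append(newCube)
--         result = newResult
--     return result
-- ===== SOURCE B (Python) =====
-- def fillOutCube(cube):
--     # Compute the available digits once, then build the permutations recursively (DFS)
--     # instead of A's layer-by-layer breadth-first expansion.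
--     available = [str(x) for x in range(0, 10) if str(x) not in cube]
--     k = 6 - len(cube)
--     if k <= 0:
--         return [list(cube)]
--
--     def perms(avail, r):
--         if r == 0:
--             return [[]]
--         return [[avail[i]] + rest
--                 for i in range(len(avail))
--                 for rest in perms(avail[:i] + avail[i + 1:], r - 1)]
--
--     return [list(cube) + p for p in perms(available, k)]
-- ===== Notes on version B (the rewrite author's own statement) =====
-- stated objective: alternative
-- what changed: B computes the list of available digits once up front and generates the 6-len(cube) extensions by a recursive depth-first permutation builder over that list, instead of A's layer-by-layer breadth-first expansion that re-filters the ten digit strings against every partial cube at every layer.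
import Mathlib
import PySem

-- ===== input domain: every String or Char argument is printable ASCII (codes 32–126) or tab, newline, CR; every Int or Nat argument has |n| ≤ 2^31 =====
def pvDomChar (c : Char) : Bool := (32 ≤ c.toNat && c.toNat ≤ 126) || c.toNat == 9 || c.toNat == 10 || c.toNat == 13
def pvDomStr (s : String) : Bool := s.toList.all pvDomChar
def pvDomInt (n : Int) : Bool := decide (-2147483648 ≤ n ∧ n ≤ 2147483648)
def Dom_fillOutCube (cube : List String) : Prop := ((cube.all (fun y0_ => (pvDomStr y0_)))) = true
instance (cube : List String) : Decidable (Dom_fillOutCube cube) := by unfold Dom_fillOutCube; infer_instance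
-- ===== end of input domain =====

-- B computes the available digits once and builds the extensions by recursive depth-first
-- permutation generation instead of A's layered breadth-first expansion (objective: alternative).

-- ===== PORT A =====
def fillOutCube (cube : List String) : List (List String) :=
  (PySem.List.pyRange ((cube.length : Int) + 1) 7 1).foldl
    (fun result _ =>
      result.foldl
        (fun newResult c =>
          (((PySem.List.pyRange 0 10 1).filter
              (fun x => !(c.contains (PySem.Int.toStr x)))).map PySem.Int.toStr).foldl
            (fun nr newNumber => nr ++ [c ++ [newNumber]]) newResult)
        [])
    [cube]

-- ===== PORT B =====
-- helper of Source B: perms(avail, r), recursion on r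
def pvPerms : List String → Nat → List (List String)
  | _, 0 => [[]]
  | avail, r + 1 =>
    (List.range avail.length).flatMap (fun i =>
      (pvPerms (avail.take i ++ avail.drop (i + 1)) r).map (fun rest => avail[i]! :: rest))

def fillOutCube_alt (cube : List String) : List (List String) :=
  let available := ((PySem.List.pyRange 0 10 1).filter
      (fun x => !(cube.contains (PySem.Int.toStr x)))).map PySem.Int.toStr
  let k : Int := 6 - (cube.length : Int)
  if k ≤ 0 then [cube]
  else (pvPerms available k.toNat).map (fun p => cube ++ p)

-- ===== PRECONDITION & SPEC =====
def Spec_fillOutCube (cube : List String) (out : List (List String)) : Prop := out = fillOutCube_alt cube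
instance (cube : List String) (out : List (List String)) : Decidable (Spec_fillOutCube cube out) := by unfold Spec_fillOutCube; infer_instance

-- ===== CLAIM (what is proved, stated in full; the proofs are below) =====
def Claim_equal_fillOutCube : Prop := ∀ (cube : List String), Dom_fillOutCube cube → Spec_fillOutCube cube (fillOutCube cube)

-- ===== LEMMAS AND PROOFS =====

-- the ten digit strings, in order
def pvDigits : List String := ["0","1","2","3","4","5","6","7","8","9"]

-- the per-partial available-digit list both programs compute
def pvAvail (c : List String) : List String :=
  ((PySem.List.pyRange 0 10 1).filter
      (fun x => !(c.contains (PySem.Int.toStr x)))).map PySem.Int.toStr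

-- one layer of A's breadth-first expansion
def pvExpand (R : List (List String)) : List (List String) :=
  R.foldl
    (fun newResult c => (pvAvail c).foldl (fun nr d => nr ++ [c ++ [d]]) newResult) []

theorem pvAvail_eq (c : List String) :
    pvAvail c = pvDigits.filter (fun s => !(c.contains s)) := by
  have h : pvDigits = (PySem.List.pyRange 0 10 1).map PySem.Int.toStr := by decide
  rw [h, List.filter_map]
  rfl

theorem pvAvail_nodup (c : List String) : (pvAvail c).Nodup := by
  rw [pvAvail_eq]
  exact List.Nodup.filter _ (by decide)

theorem pvExpand_go (R : List (List String)) (acc : List (List String)) :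
    R.foldl (fun nr c => (pvAvail c).foldl (fun a d => a ++ [c ++ [d]]) nr) acc
      = acc ++ R.flatMap (fun c => (pvAvail c).map (fun d => c ++ [d])) := by
  induction R generalizing acc with
  | nil => simp
  | cons h t ih =>
    rw [List.foldl_cons, ih,
      PySem.List.foldl_append_singleton_eq_map (fun d => h ++ [d]) (pvAvail h) acc]
    simp

theorem pvExpand_eq (R : List (List String)) :
    pvExpand R = R.flatMap (fun c => (pvAvail c).map (fun d => c ++ [d])) := by
  rw [pvExpand, pvExpand_go]
  simp

theorem pvExpand_append (A B : List (List String)) :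
    pvExpand (A ++ B) = pvExpand A ++ pvExpand B := by
  simp [pvExpand_eq]

theorem pvIter_append (m : Nat) (A B : List (List String)) :
    pvExpand^[m] (A ++ B) = pvExpand^[m] A ++ pvExpand^[m] B := by
  induction m generalizing A B with
  | zero => rfl
  | succ m ih => rw [Function.iterate_succ_apply, Function.iterate_succ_apply,
      Function.iterate_succ_apply, pvExpand_append, ih]

theorem pvIter_nil (m : Nat) : pvExpand^[m] ([] : List (List String)) = [] := by
  induction m with
  | zero => rfl
  | succ m ih => rw [Function.iterate_succ_apply]; exact ih

theorem pvIter_flatMap (m : Nat) (L : List (List String)) :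
    pvExpand^[m] L = L.flatMap (fun c => pvExpand^[m] [c]) := by
  induction L with
  | nil => simp [pvIter_nil]
  | cons c t ih =>
    have : c :: t = [c] ++ t := rfl
    rw [this, pvIter_append, ih]
    simp

-- flatMap over elements = flatMap over indices
theorem pvFlatMap_range {β : Type} (l : List String) (f : String → List β) :
    l.flatMap f = (List.range l.length).flatMap (fun i => f l[i]!) := by
  induction l with
  | nil => simp
  | cons h t ih =>
    simp [List.range_succ_eq_map, ih, List.flatMap_map]

-- for a duplicate-free list, removing position i = filtering out the element at i
theorem pvEraseIdx_eq_filter (A : List String) (i : Nat) (hnd : A.Nodup) (hi : i < A.length) :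
    A.take i ++ A.drop (i + 1) = A.filter (fun s => !(s == A[i]!)) := by
  induction A generalizing i with
  | nil => simp at hi
  | cons h t ih =>
    rcases List.nodup_cons.mp hnd with ⟨hmem, hnd'⟩
    cases i with
    | zero =>
      rw [getElem!_pos (h :: t) 0 hi]
      simp only [List.getElem_cons_zero, List.take_zero, List.drop_succ_cons, List.drop_zero,
        List.nil_append, List.filter_cons, BEq.rfl, Bool.not_true, Bool.false_eq_true, if_false]
      symm
      apply List.filter_eq_self.mpr
      intro s hs
      have hne : s ≠ h := fun hcon => hmem (hcon ▸ hs)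
      simp [hne]
    | succ i =>
      have hi' : i < t.length := by simpa using hi
      rw [getElem!_pos (h :: t) (i + 1) hi]
      simp only [List.getElem_cons_succ, List.take_succ_cons, List.drop_succ_cons,
        List.cons_append, List.filter_cons]
      have hne : (h == t[i]) = false := by
        simp only [beq_eq_false_iff_ne, ne_eq]
        intro hcon
        exact hmem (hcon ▸ List.getElem_mem hi')
      rw [hne]
      simp only [Bool.not_false, if_true]
      rw [ih i hnd' hi', getElem!_pos t i hi']

-- appending one unused digit shrinks the available pool by exactly that digit
theorem pvAvail_append (c : List String) (i : Nat) (hi : i < (pvAvail c).length) :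
    pvAvail (c ++ [(pvAvail c)[i]!]) = (pvAvail c).take i ++ (pvAvail c).drop (i + 1) := by
  rw [pvEraseIdx_eq_filter (pvAvail c) i (pvAvail_nodup c) hi]
  rw [pvAvail_eq, pvAvail_eq, List.filter_filter]
  apply List.filter_congr
  intro s _
  simp only [List.contains_eq_mem, List.mem_append, List.mem_singleton, Bool.decide_or,
    Bool.not_or, Bool.and_comm]
  rfl

-- the core correspondence: m layers of A's expansion of a single partial c
-- produce exactly the m-permutations of c's available digits, appended to c
theorem pvIter_perms (m : Nat) (c : List String) :
    pvExpand^[m] [c] = (pvPerms (pvAvail c) m).map (fun p => c ++ p) := by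
  induction m generalizing c with
  | zero => simp [pvPerms]
  | succ m ih =>
    rw [Function.iterate_succ_apply]
    have h1 : pvExpand [c] = (pvAvail c).map (fun d => c ++ [d]) := by
      rw [pvExpand_eq]; simp
    rw [h1, pvIter_flatMap, List.flatMap_map]
    have h2 : ∀ d, pvExpand^[m] [c ++ [d]]
        = (pvPerms (pvAvail (c ++ [d])) m).map (fun p => (c ++ [d]) ++ p) := fun d => ih _
    calc ((pvAvail c).flatMap fun d => pvExpand^[m] [c ++ [d]])
        = (List.range (pvAvail c).length).flatMap
            (fun i => pvExpand^[m] [c ++ [(pvAvail c)[i]!]]) :=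
          pvFlatMap_range (pvAvail c) _
      _ = (pvPerms (pvAvail c) (m + 1)).map (fun p => c ++ p) := by
          rw [pvPerms]
          rw [List.map_flatMap]
          apply List.flatMap_congr
          intro i hi
          have hi' : i < (pvAvail c).length := List.mem_range.mp hi
          rw [h2, pvAvail_append c i hi', List.map_map]
          apply List.map_congr_left
          intro p _
          simp

-- A's loop over range(len+1, 7) is (6 - len)⁺ iterations of pvExpand
theorem pvFoldl_const_expand (l : List Int) (init : List (List String)) :
    l.foldl (fun r _ => pvExpand r) init = pvExpand^[l.length] init :=
  List.foldl_const pvExpand init l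

theorem fillOutCube_eq_iter (cube : List String) :
    fillOutCube cube = pvExpand^[((6 : Int) - cube.length).toNat] [cube] := by
  rw [fillOutCube]
  rw [show (fun (result : List (List String)) (_ : Int) =>
      result.foldl
        (fun newResult c =>
          (((PySem.List.pyRange 0 10 1).filter
              (fun x => !(c.contains (PySem.Int.toStr x)))).map PySem.Int.toStr).foldl
            (fun nr newNumber => nr ++ [c ++ [newNumber]]) newResult)
        []) = fun r _ => pvExpand r from rfl]
  rw [pvFoldl_const_expand, PySem.List.length_pyRange_one]
  congr 2
  omega

-- ===== VERDICT (by name: the statement is the Claim_ definition above) =====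
theorem fillOutCube_spec : Claim_equal_fillOutCube := by
  intro cube _
  unfold Spec_fillOutCube fillOutCube_alt
  rw [fillOutCube_eq_iter]
  by_cases h : (6 : Int) - (cube.length : Int) ≤ 0
  · rw [if_pos h]
    have : ((6 : Int) - cube.length).toNat = 0 := by omega
    rw [this]
    rfl
  · rw [if_neg h]
    exact pvIter_perms _ cube
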